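-- pv_equiv track=rewrite | github.com/heybake/ev-navigator-deuces | dw_strategy_definitions.py | holds_3_to_royal
-- ===== SOURCE A (Python) =====
-- def _get_cards(indices, original_hand):
--     return [original_hand[i] for i in indices]
--
-- def holds_3_to_royal(ranks, suits, hand):
--     needed = {10, 11, 12, 13, 14}
--     deuces_indices = [i for i, r in enumerate(ranks) if r == 2]
--     for s_char in 'shdc':
--         suit_indices = [i for i, (r, s) in enumerate(zip(ranks, suits)) if s == s_char and r != 2]
--         royal_indices = [i for i in suit_indices if ranks[i] in needed]
--         if len(royal_indices) + len(deuces_indices) == 3: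
--             return _get_cards(royal_indices + deuces_indices, hand)
--     return None
-- ===== SOURCE B (Python) =====
-- def holds_3_to_royal(ranks, suits, hand):
--     groups = {}
--     deuces = []
--     for i, r in enumerate(ranks):
--         if r == 2:
--             deuces.append(i)
--         elif r in (10, 11, 12, 13, 14) and i < len(suits):
--             groups.setdefault(suits[i], []).append(i)
--     for s in 'shdc':
--         idxs = groups.get(s, [])
--         if len(idxs) + len(deuces) == 3:
--             return [hand[i] for i in idxs + deuces]
--     return None
-- ===== Notes on version B (the rewrite author's own statement) =====
-- stated objective: faster
-- what changed: Replaced A's four per-suit rescans of enumerate(zip(ranks,suits)) (each followed by a ranks[i]-lookup refilter) by a single pass over enumerate(ranks) that simultaneously collects deuce indices and groups royal-card indices into a dict keyed by suit, so the 'shdc' loop only does dict lookups.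
import Mathlib
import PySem

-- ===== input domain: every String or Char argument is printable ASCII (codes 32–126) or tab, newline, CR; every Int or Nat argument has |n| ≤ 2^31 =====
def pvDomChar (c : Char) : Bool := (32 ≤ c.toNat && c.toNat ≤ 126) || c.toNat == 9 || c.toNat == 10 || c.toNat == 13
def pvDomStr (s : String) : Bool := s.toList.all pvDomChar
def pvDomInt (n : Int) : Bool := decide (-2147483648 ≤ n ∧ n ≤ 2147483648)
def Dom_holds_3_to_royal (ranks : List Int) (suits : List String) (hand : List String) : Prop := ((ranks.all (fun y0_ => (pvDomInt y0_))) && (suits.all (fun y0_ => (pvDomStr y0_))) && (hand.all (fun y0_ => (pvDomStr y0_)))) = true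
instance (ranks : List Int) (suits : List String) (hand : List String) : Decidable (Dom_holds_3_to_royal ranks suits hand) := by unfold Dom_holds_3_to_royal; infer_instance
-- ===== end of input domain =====

-- B replaces A's four per-suit rescans by one grouping pass (dict: suit -> royal indices, plus the
-- deuce index list) followed by a lookup-only loop over 'shdc'; same cost class, different structure.

-- ===== PORT A =====
-- needed = {10, 11, 12, 13, 14} (used for membership tests only)
def pyNeededA : List Int := [10, 11, 12, 13, 14]

-- [original_hand[i] for i in indices]; none = IndexError
def get_cards (indices : List Int) (original_hand : List String) : Option (List String) :=
  indices.mapM (fun i => PySem.List.pyGet? original_hand i)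

def holdsA_loop (ranks : List Int) (suits : List String) (hand : List String)
    (deuces : List Int) : List String → Option (List String)
  | [] => none
  | c :: rest =>
      let suit_indices := ((PySem.List.enumerate (List.zip ranks suits) 0).filter
          (fun p => p.2.2 == c && !(p.2.1 == 2))).map (·.1)
      -- ranks[i]: i is an enumerate index of zip(ranks, suits), always in range, so pyGetD is exact here
      let royal := suit_indices.filter (fun i => pyNeededA.contains (PySem.List.pyGetD ranks i 0))
      if royal.length + deuces.length == 3 then get_cards (royal ++ deuces) hand
      else holdsA_loop ranks suits hand deuces rest

def holds_3_to_royal (ranks : List Int) (suits : List String) (hand : List String) : Option (List String) :=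
  let deuces := ((PySem.List.enumerate ranks 0).filter (fun p => p.2 == 2)).map (·.1)
  holdsA_loop ranks suits hand deuces ["s", "h", "d", "c"]

-- ===== PORT B =====
def royalsB : List Int := [10, 11, 12, 13, 14]

-- loop body: deuce indices appended to st.2; royal-card indices grouped per suit in the dict st.1
def holdsB_step (suits : List String) (st : PySem.Dict String (List Int) × List Int)
    (p : Int × Int) : PySem.Dict String (List Int) × List Int :=
  if p.2 == 2 then (st.1, st.2 ++ [p.1])
  else if royalsB.contains p.2 && decide (p.1 < (suits.length : Int)) then
    -- suits[i]: guarded by i < len(suits), so pyGetD is exact here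
    (st.1.modify (PySem.List.pyGetD suits p.1 "") [] (· ++ [p.1]), st.2)
  else st

def holdsB_find (hand : List String) (groups : PySem.Dict String (List Int))
    (deuces : List Int) : List String → Option (List String)
  | [] => none
  | s :: rest =>
      let idxs := groups.getD s []
      if idxs.length + deuces.length == 3 then
        (idxs ++ deuces).mapM (fun i => PySem.List.pyGet? hand i)   -- none = IndexError
      else holdsB_find hand groups deuces rest

def holds_3_to_royal_alt (ranks : List Int) (suits : List String) (hand : List String) : Option (List String) :=
  let st := (PySem.List.enumerate ranks 0).foldl (holdsB_step suits) (PySem.Dict.empty, [])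
  holdsB_find hand st.1 st.2 ["s", "h", "d", "c"]

-- ===== PRECONDITION & SPEC =====
-- helpers for Pre_ (independent of both ports)
def pvRoyalIdx (ranks : List Int) (suits : List String) (c : String) : List Int :=
  ((PySem.List.enumerate (List.zip ranks suits) 0).filter
    (fun p => p.2.2 == c && [(10 : Int), 11, 12, 13, 14].contains p.2.1)).map (·.1)

def pvDeuceIdx (ranks : List Int) : List Int :=
  ((PySem.List.enumerate ranks 0).filter (fun p => p.2 == 2)).map (·.1)

-- Pre_ excludes exactly the inputs where the Python raises IndexError: the first suit whose
-- royal-card count plus deuce count equals 3 selects an index ≥ len(hand).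
def Pre_holds_3_to_royal (ranks : List Int) (suits : List String) (hand : List String) : Prop :=
  (match ["s", "h", "d", "c"].find?
      (fun c => (pvRoyalIdx ranks suits c).length + (pvDeuceIdx ranks).length == 3) with
   | none => true
   | some c => ((pvRoyalIdx ranks suits c) ++ (pvDeuceIdx ranks)).all
       (fun i => decide (i < (hand.length : Int)))) = true

instance (ranks : List Int) (suits : List String) (hand : List String) : Decidable (Pre_holds_3_to_royal ranks suits hand) := by unfold Pre_holds_3_to_royal; infer_instance

def pvWitness_holds_3_to_royal : List Int × List String × List String :=
  ([10, 11, 12], ["s", "s", "s"], ["Ts", "Js", "Qs"])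

def Spec_holds_3_to_royal (ranks : List Int) (suits : List String) (hand : List String) (out : Option (List String)) : Prop := out = holds_3_to_royal_alt ranks suits hand
instance (ranks : List Int) (suits : List String) (hand : List String) (out : Option (List String)) : Decidable (Spec_holds_3_to_royal ranks suits hand out) := by unfold Spec_holds_3_to_royal; infer_instance

-- ===== CLAIM (what is proved, stated in full; the proofs are below) =====
def Claim_equal_holds_3_to_royal : Prop := ∀ (ranks : List Int) (suits : List String) (hand : List String), Dom_holds_3_to_royal ranks suits hand → Pre_holds_3_to_royal ranks suits hand → Spec_holds_3_to_royal ranks suits hand (holds_3_to_royal ranks suits hand)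

-- ===== LEMMAS AND PROOFS =====

-- the dict-only part of B's loop body
def gStep (suits : List String) (g : PySem.Dict String (List Int)) (p : Int × Int) :
    PySem.Dict String (List Int) :=
  if p.2 == 2 then g
  else if royalsB.contains p.2 && decide (p.1 < (suits.length : Int)) then
    g.modify (PySem.List.pyGetD suits p.1 "") [] (· ++ [p.1])
  else g

-- A's per-suit royal index list
def pvRA (ranks : List Int) (suits : List String) (c : String) : List Int :=
  (((PySem.List.enumerate (List.zip ranks suits) 0).filter
      (fun p => p.2.2 == c && !(p.2.1 == 2))).map (·.1)).filter
    (fun i => pyNeededA.contains (PySem.List.pyGetD ranks i 0))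

theorem foldB_split (suits : List String) (l : List (Int × Int)) :
    ∀ g d, l.foldl (holdsB_step suits) (g, d) =
      (l.foldl (gStep suits) g, d ++ (l.filter (fun p => p.2 == 2)).map (·.1)) := by
  induction l with
  | nil => intro g d; simp
  | cons p l ih =>
    intro g d
    simp only [List.foldl_cons, List.filter_cons]
    cases h : (p.2 == 2) with
    | true =>
      simp only [holdsB_step, gStep, h, if_pos]
      rw [ih]
      simp
    | false =>
      by_cases h2 : (royalsB.contains p.2 && decide (p.1 < (suits.length : Int))) = true
      · simp only [holdsB_step, gStep, h, Bool.false_eq_true, if_false, h2, if_pos]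
        rw [ih]
      · simp only [holdsB_step, gStep, h, Bool.false_eq_true, if_false, h2]
        exact ih g d

theorem groups_getD (suits : List String) (c : String) (l : List (Int × Int)) :
    ∀ g, (l.foldl (gStep suits) g).getD c [] =
      g.getD c [] ++ ((l.filter (fun p => !(p.2 == 2) &&
        (royalsB.contains p.2 && decide (p.1 < (suits.length : Int))) &&
        (PySem.List.pyGetD suits p.1 "" == c))).map (·.1)) := by
  induction l with
  | nil => intro g; simp
  | cons p l ih =>
    intro g
    simp only [List.foldl_cons, List.filter_cons, gStep]
    cases h : (p.2 == 2) with
    | true => simp only [h, if_pos]; rw [ih]; simp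
    | false =>
      by_cases h2 : (royalsB.contains p.2 && decide (p.1 < (suits.length : Int))) = true
      · simp only [h, Bool.false_eq_true, if_false, h2, if_pos]
        rw [ih]
        by_cases h3 : PySem.List.pyGetD suits p.1 "" = c
        · simp [h3]
        · have h3' : ¬ c = PySem.List.pyGetD suits p.1 "" := fun hh => h3 hh.symm
          simp [h3, h3', PySem.Dict.getD_modify]
      · simp only [h, Bool.false_eq_true, if_false, h2]
        rw [ih]
        simp

theorem filter_range_ext (P Q : Int → Bool) (n m : Int) (h0 : 0 ≤ n) (hnm : n ≤ m)
    (hEq : ∀ j, 0 ≤ j → j < n → P j = Q j)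
    (hQ : ∀ j, n ≤ j → j < m → Q j = false) :
    (PySem.List.pyRange 0 n 1).filter P = (PySem.List.pyRange 0 m 1).filter Q := by
  rw [PySem.List.pyRange_one_append 0 n m h0 hnm, List.filter_append]
  have h1 : (PySem.List.pyRange 0 n 1).filter P = (PySem.List.pyRange 0 n 1).filter Q :=
    List.filter_congr (fun j hj => by
      rw [PySem.List.mem_pyRange_one] at hj; exact hEq j hj.1 hj.2)
  have h2 : (PySem.List.pyRange n m 1).filter Q = [] :=
    List.filter_eq_nil_iff.mpr (fun j hj => by
      rw [PySem.List.mem_pyRange_one] at hj; simp [hQ j hj.1 hj.2])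
  rw [h1, h2, List.append_nil]

theorem RA_eq (ranks : List Int) (suits : List String) (c : String) :
    pvRA ranks suits c =
      ((PySem.List.enumerate ranks 0).filter (fun p => !(p.2 == 2) &&
        (royalsB.contains p.2 && decide (p.1 < (suits.length : Int))) &&
        (PySem.List.pyGetD suits p.1 "" == c))).map (·.1) := by
  unfold pvRA
  rw [PySem.List.enumerate_eq_map_pyRange (List.zip ranks suits) ((0 : Int), ("" : String)),
      PySem.List.enumerate_eq_map_pyRange ranks (0 : Int)]
  simp only [List.filter_map, List.map_map, List.filter_filter, Function.comp_def,
    List.map_id']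
  apply filter_range_ext
  · simp
  · simp [List.length_zip]
  · intro j hj0 hjn
    simp only [PySem.List.len_eq, List.length_zip] at hjn
    have hk1 : j.toNat < (ranks.zip suits).length := by
      simp [List.length_zip]; omega
    have hk2 : j.toNat < ranks.length := by simp [List.length_zip] at hk1; omega
    have hk3 : j.toNat < suits.length := by simp [List.length_zip] at hk1; omega
    have hkj : j = ((j.toNat : Nat) : Int) := by omega
    rw [hkj]
    simp only [PySem.List.pyGetD_natCast]
    rw [List.getD_eq_getElem _ _ hk1, List.getD_eq_getElem _ _ hk2,
        List.getD_eq_getElem _ _ hk3, List.getElem_zip]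
    have hlt : decide (((j.toNat : Nat) : Int) < (suits.length : Int)) = true := by
      simp; omega
    simp only [hlt, pyNeededA, royalsB]
    cases hb1 : (ranks[j.toNat] == 2) <;>
      cases hb2 : (suits[j.toNat] == c) <;>
        cases hb3 : ([(10 : Int), 11, 12, 13, 14].contains ranks[j.toNat]) <;>
          simp [hb1, hb2, hb3]
  · intro j hjn hjm
    simp only [PySem.List.len_eq, List.length_zip] at hjn hjm
    have hns : ¬ (j < (suits.length : Int)) := by omega
    simp [hns]

theorem loop_eq (ranks : List Int) (suits : List String) (hand : List String)
    (groups : PySem.Dict String (List Int)) (dz : List Int)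
    (hyp : ∀ c, pvRA ranks suits c = groups.getD c []) :
    ∀ scs, holdsA_loop ranks suits hand dz scs = holdsB_find hand groups dz scs := by
  intro scs
  induction scs with
  | nil => rfl
  | cons c rest ih =>
    simp only [holdsA_loop, holdsB_find, get_cards]
    have h := hyp c
    unfold pvRA at h
    rw [h, ih]

-- ===== VERDICT (by name: the statement is the Claim_ definition above) =====
theorem holds_3_to_royal_spec : Claim_equal_holds_3_to_royal := by
  intro ranks suits hand _ _
  unfold Spec_holds_3_to_royal
  simp only [holds_3_to_royal, holds_3_to_royal_alt]
  rw [foldB_split]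
  exact loop_eq ranks suits hand _ _
    (fun c => by rw [RA_eq, groups_getD]; simp) _
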